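-- pv_equiv track=rewrite | github.com/affan-ansari-839/python-learning | python_algorithm/plane_sweep_algorithm.py | plane_sweep
-- ===== SOURCE A (Python) =====
-- def plane_sweep(n, p):
--     p.sort(key=lambda point: point[0])
--     s = []
--     for i in range(n):
--         while (s != [] and s[-1][1]<=p[i][1]):
--             s.pop()
--         s.append(p[i])
--
--     return s
-- ===== SOURCE B (Python) =====
-- def plane_sweep(n, p):
--     p.sort(key=lambda point: point[0])
--     res = []
--     maxY = None
--     for i in range(n - 1, -1, -1):
--         y = p[i][1]
--         if maxY is None or y > maxY:
--             res.append(p[i])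
--             maxY = y
--     res.reverse()
--     return res
-- ===== Notes on version B (the rewrite author's own statement) =====
-- stated objective: alternative
-- what changed: Replaces the forward monotonic stack (pop while top y <= current y) by a backward scan keeping a single scalar running maximum of y, collecting suffix strict maxima and reversing at the end.
import Mathlib
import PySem

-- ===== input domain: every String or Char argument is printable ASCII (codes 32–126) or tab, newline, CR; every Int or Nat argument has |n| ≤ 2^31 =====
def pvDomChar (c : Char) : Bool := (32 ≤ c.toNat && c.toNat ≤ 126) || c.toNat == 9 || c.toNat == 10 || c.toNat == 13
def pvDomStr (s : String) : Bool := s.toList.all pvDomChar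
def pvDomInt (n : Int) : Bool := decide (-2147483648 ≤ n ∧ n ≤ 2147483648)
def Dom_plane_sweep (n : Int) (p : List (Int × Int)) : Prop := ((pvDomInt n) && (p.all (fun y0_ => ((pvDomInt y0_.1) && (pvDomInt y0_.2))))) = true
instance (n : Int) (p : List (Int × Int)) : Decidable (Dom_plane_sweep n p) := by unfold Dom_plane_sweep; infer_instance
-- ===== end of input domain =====

-- B replaces A's forward monotonic stack by a backward scan with a scalar running maximum (alternative
-- decomposition, same cost). Both Pythons sort p in place; the equivalence proved here is about the return value.

-- ===== PORT A =====
-- the 'while s != [] and s[-1][1] <= p[i][1]: s.pop()' loop; the stack is stored top-first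
-- (Lean head = Python s[-1]), so pop = drop the head
def pvPopLE (s : List (Int × Int)) (y : Int) : List (Int × Int) :=
  match s with
  | [] => []
  | t :: r => if t.2 ≤ y then pvPopLE r y else t :: r

def plane_sweep (n : Int) (p : List (Int × Int)) : List (Int × Int) :=
  let ps := PySem.List.sorted p (fun point => point.1) false  -- p.sort(key=lambda point: point[0])
  let s := (PySem.List.pyRange 0 n 1).foldl
    (fun s i =>
      let pi := PySem.List.pyGetD ps i (0, 0)  -- p[i]; in range under Pre_plane_sweep
      pi :: pvPopLE s pi.2)                     -- while-pop then s.append(p[i]) (stack top-first)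
    []
  s.reverse  -- restore Python's bottom-first list order

-- ===== PORT B =====
-- the loop body of B: state (res, maxY); 'if maxY is None or y > maxY: res.append(p[i]); maxY = y'
def pvBStep (st : List (Int × Int) × Option Int) (x : Int × Int) : List (Int × Int) × Option Int :=
  match st.2 with
  | none => (st.1 ++ [x], some x.2)
  | some m => if x.2 > m then (st.1 ++ [x], some x.2) else st

def plane_sweep_alt (n : Int) (p : List (Int × Int)) : List (Int × Int) :=
  let ps := PySem.List.sorted p (fun point => point.1) false  -- p.sort(key=lambda point: point[0])
  let st := (PySem.List.pyRange (n - 1) (-1) (-1)).foldl      -- for i in range(n-1, -1, -1)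
    (fun st i => pvBStep st (PySem.List.pyGetD ps i (0, 0)))  -- p[i]; in range under Pre_plane_sweep
    ([], none)
  st.1.reverse  -- res.reverse()

-- ===== PRECONDITION & SPEC =====
-- Pre_ excludes exactly the inputs where A raises IndexError (n exceeds len(p)); B raises there too.
def Pre_plane_sweep (n : Int) (p : List (Int × Int)) : Prop := n ≤ (p.length : Int)
instance (n : Int) (p : List (Int × Int)) : Decidable (Pre_plane_sweep n p) := by unfold Pre_plane_sweep; infer_instance
def pvWitness_plane_sweep : Int × (List (Int × Int)) := (3, [(2, 1), (0, 0), (1, 2)])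

def Spec_plane_sweep (n : Int) (p : List (Int × Int)) (out : List (Int × Int)) : Prop := out = plane_sweep_alt n p
instance (n : Int) (p : List (Int × Int)) (out : List (Int × Int)) : Decidable (Spec_plane_sweep n p out) := by unfold Spec_plane_sweep; infer_instance

-- ===== CLAIM (what is proved, stated in full; the proofs are below) =====
def Claim_equal_plane_sweep : Prop := ∀ (n : Int) (p : List (Int × Int)), Dom_plane_sweep n p → Pre_plane_sweep n p → Spec_plane_sweep n p (plane_sweep n p)

-- ===== LEMMAS AND PROOFS =====

-- the monotonic-stack fold of A, over a plain element list (stack top-first)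
def pvStack (t : List (Int × Int)) : List (Int × Int) :=
  t.foldl (fun s x => x :: pvPopLE s x.2) []

-- the backward scan of B, over a plain element list, collecting in traversal order
def pvGo (u : List (Int × Int)) (mo : Option Int) : List (Int × Int) :=
  match u with
  | [] => []
  | x :: r =>
    match mo with
    | none => x :: pvGo r (some x.2)
    | some m => if x.2 > m then x :: pvGo r (some x.2) else pvGo r mo

lemma pvPopLE_eq_dropWhile (s : List (Int × Int)) (y : Int) :
    pvPopLE s y = s.dropWhile (fun z => decide (z.2 ≤ y)) := by
  induction s with
  | nil => rfl
  | cons t r ih =>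
    simp only [pvPopLE, List.dropWhile]
    by_cases h : t.2 ≤ y <;> simp [h, ih]

lemma dropWhile_dropWhile_of_imp {α : Type} (p q : α → Bool) (l : List α)
    (h : ∀ z, q z = true → p z = true) :
    (l.dropWhile q).dropWhile p = l.dropWhile p := by
  induction l with
  | nil => rfl
  | cons z r ih =>
    by_cases hq : q z = true
    · have hp := h z hq
      simp [List.dropWhile, hq, hp, ih]
    · simp [List.dropWhile, hq]

-- index-fold over range m equals element-fold over take m (forward, for A)
lemma foldl_range_getD {α β : Type} (f : β → α → β) (l : List α) (d : α) :
    ∀ (m : Nat), m ≤ l.length → ∀ (init : β),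
      (List.range m).foldl (fun acc k => f acc (l.getD k d)) init = (l.take m).foldl f init := by
  intro m
  induction m with
  | zero => intro _ init; simp
  | succ m ih =>
    intro h init
    have hm : m < l.length := by omega
    rw [List.range_succ, List.foldl_append, ih (by omega) init]
    have ht : l.take (m + 1) = l.take m ++ [l[m]] := by
      rw [List.take_add_one]
      simp [List.getElem?_eq_getElem hm]
    rw [ht, List.foldl_append]
    simp [List.getD, List.getElem?_eq_getElem hm]

-- index-foldr over range m equals element-foldr over take m (used for B's backward scan)
lemma foldr_range_getD {α β : Type} (g : α → β → β) (l : List α) (d : α) :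
    ∀ (m : Nat), m ≤ l.length → ∀ (init : β),
      (List.range m).foldr (fun k acc => g (l.getD k d) acc) init = (l.take m).foldr g init := by
  intro m
  induction m with
  | zero => intro _ init; simp
  | succ m ih =>
    intro h init
    have hm : m < l.length := by omega
    have ht : l.take (m + 1) = l.take m ++ [l[m]] := by
      rw [List.take_add_one]
      simp [List.getElem?_eq_getElem hm]
    rw [List.range_succ, List.foldr_append, ht, List.foldr_append]
    rw [ih (by omega)]
    simp [List.getD, List.getElem?_eq_getElem hm]

-- B's pair-state foldl collects exactly pvGo, appended after the accumulator
lemma foldl_pair_eq_go (u : List (Int × Int)) :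
    ∀ (acc : List (Int × Int)) (mo : Option Int),
      (u.foldl pvBStep (acc, mo)).1 = acc ++ pvGo u mo := by
  induction u with
  | nil => intro acc mo; simp [pvGo]
  | cons x r ih =>
    intro acc mo
    rw [List.foldl_cons]
    cases mo with
    | none => simp [pvGo, pvBStep, ih]
    | some m =>
      by_cases h : x.2 > m
      · simp [pvGo, pvBStep, h, ih]
      · simp [pvGo, pvBStep, h, ih]

-- the stack step on an element appended at the right
lemma pvStack_append (t : List (Int × Int)) (x : Int × Int) :
    pvStack (t ++ [x]) = x :: pvPopLE (pvStack t) x.2 := by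
  simp [pvStack, List.foldl_append]

-- CORE: B's backward scan of u equals A's stack of u.reverse, filtered by the running threshold
lemma go_reverse_eq_stack (u : List (Int × Int)) :
    ∀ (mo : Option Int),
      pvGo u mo = match mo with
        | none => pvStack u.reverse
        | some m => (pvStack u.reverse).dropWhile (fun z => decide (z.2 ≤ m)) := by
  induction u with
  | nil => intro mo; cases mo <;> simp [pvGo, pvStack]
  | cons x r ih =>
    intro mo
    have hs : pvStack (x :: r).reverse = x :: pvPopLE (pvStack r.reverse) x.2 := by
      rw [List.reverse_cons, pvStack_append]
    cases mo with
    | none =>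
      simp only [pvGo, hs, ih (some x.2), pvPopLE_eq_dropWhile]
    | some m =>
      by_cases h : x.2 > m
      · simp only [pvGo, if_pos h, hs, List.dropWhile]
        rw [show decide (x.2 ≤ m) = false from by simp; omega]
        simp only [ih (some x.2), pvPopLE_eq_dropWhile]
      · simp only [pvGo, if_neg h, hs, List.dropWhile]
        rw [show decide (x.2 ≤ m) = true from by simp; omega]
        rw [ih (some m), pvPopLE_eq_dropWhile]
        have hd := dropWhile_dropWhile_of_imp (fun z : Int × Int => decide (z.2 ≤ m))
          (fun z : Int × Int => decide (z.2 ≤ x.2)) (pvStack r.reverse)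
          (by intro z hz; simp at hz ⊢; omega)
        rw [hd]

theorem plane_sweep_spec : Claim_equal_plane_sweep := by
  intro n p _ hpre
  unfold Spec_plane_sweep
  simp only [plane_sweep, plane_sweep_alt]
  set ps := PySem.List.sorted p (fun point => point.1) false with hps
  have hl : ps.length = p.length := by
    rw [hps]; exact PySem.List.length_sorted p _ false
  have hlen : n.toNat ≤ ps.length := by
    unfold Pre_plane_sweep at hpre; omega
  have hget : ∀ (k : Nat), PySem.List.pyGetD ps ((0 : Int) + k) (0, 0) = ps.getD k (0, 0) := by
    intro k; rw [zero_add, PySem.List.pyGetD_natCast]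
  -- A side: reduce the indexed range-fold to pvStack over (ps.take n.toNat)
  have hA : (PySem.List.pyRange 0 n 1).foldl
      (fun s i => (PySem.List.pyGetD ps i (0, 0)) :: pvPopLE s (PySem.List.pyGetD ps i (0, 0)).2) []
      = pvStack (ps.take n.toNat) := by
    rw [PySem.List.pyRange_one, List.foldl_map]
    simp only [hget, sub_zero]
    exact foldl_range_getD (fun s x => x :: pvPopLE s x.2) ps (0, 0) n.toNat hlen []
  -- B side: countdown range is the reverse of the forward range
  have hrev : PySem.List.pyRange (n - 1) (-1) (-1) = (PySem.List.pyRange 0 n 1).reverse := by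
    have := PySem.List.pyRange_neg_one_eq_reverse (a := n - 1) (b := -1)
    simpa using this
  have hB : ((PySem.List.pyRange (n - 1) (-1) (-1)).foldl
      (fun st i => pvBStep st (PySem.List.pyGetD ps i (0, 0))) ([], none)).1
      = pvGo ((ps.take n.toNat).reverse) none := by
    rw [hrev, PySem.List.pyRange_one, ← List.map_reverse, List.foldl_map]
    simp only [hget, sub_zero]
    rw [List.foldl_reverse,
      foldr_range_getD (fun x st => pvBStep st x) ps (0, 0) n.toNat hlen ([], none),
      ← List.foldl_reverse, foldl_pair_eq_go]
    simp
  rw [hA, hB, go_reverse_eq_stack]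
  simp
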